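-- pv_equiv track=rewrite | github.com/dpickem/nemoclaw_escapades | src/nemoclaw_escapades/tools/files.py | _number_and_truncate
-- ===== SOURCE A (Python) =====
-- def _number_and_truncate(
--     lines: list[str],
--     start: int,
--     total: int,
--     char_limit: int,
-- ) -> str:
--     """Add line numbers and a header, truncating at *char_limit* characters.
--
--     Args:
--         lines: Selected lines (with original newlines stripped later).
--         start: 0-based index of the first selected line in the file.
--         total: Total number of lines in the file.
--         char_limit: Character budget for the output body.
--
--     Returns:
--         Formatted string with a header and numbered lines.
--     """
--     result_lines: list[str] = []
--     char_count: int = 0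
--     for i, line in enumerate(lines, start=start + 1):
--         numbered = f"{i:>6}|{line.rstrip()}"
--         char_count += len(numbered) + 1
--         if char_count > char_limit:
--             result_lines.append(f"... (truncated at {char_limit} chars)")
--             break
--         result_lines.append(numbered)
--
--     end = start + len(lines)
--     if start > 0 or end < total:
--         header = f"(showing lines {start + 1}\u2013{min(end, total)} of {total})"
--     else:
--         header = f"({total} lines total)"
--     return f"{header}\n" + "\n".join(result_lines)
-- ===== SOURCE B (Python) =====
-- def _number_and_truncate(
--     lines: list[str],
--     start: int,
--     total: int,
--     char_limit: int,
-- ) -> str: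
--     """Number lines, add a header, truncate at char_limit (prefix-sum variant)."""
--     numbered = [f"{i:>6}|{line.rstrip()}" for i, line in enumerate(lines, start=start + 1)]
--     sums = []
--     running = 0
--     for s in numbered:
--         running += len(s) + 1
--         sums.append(running)
--     cut = next((k for k, c in enumerate(sums) if c > char_limit), None)
--     if cut is None:
--         body = numbered
--     else:
--         body = numbered[:cut] + [f"... (truncated at {char_limit} chars)"]
--     end = start + len(lines)
--     if start > 0 or end < total:
--         header = f"(showing lines {start + 1}\u2013{min(end, total)} of {total})"
--     else:
--         header = f"({total} lines total)"
--     return f"{header}\n" + "\n".join(body)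
-- ===== Notes on version B (the rewrite author's own statement) =====
-- stated objective: alternative
-- what changed: Replaces A's single fused loop (running char count with an early break) by a pipeline: build all numbered lines first, compute the running prefix sums of their lengths+1, find the first index whose sum exceeds char_limit, then slice and append the truncation marker.
import Mathlib
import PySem

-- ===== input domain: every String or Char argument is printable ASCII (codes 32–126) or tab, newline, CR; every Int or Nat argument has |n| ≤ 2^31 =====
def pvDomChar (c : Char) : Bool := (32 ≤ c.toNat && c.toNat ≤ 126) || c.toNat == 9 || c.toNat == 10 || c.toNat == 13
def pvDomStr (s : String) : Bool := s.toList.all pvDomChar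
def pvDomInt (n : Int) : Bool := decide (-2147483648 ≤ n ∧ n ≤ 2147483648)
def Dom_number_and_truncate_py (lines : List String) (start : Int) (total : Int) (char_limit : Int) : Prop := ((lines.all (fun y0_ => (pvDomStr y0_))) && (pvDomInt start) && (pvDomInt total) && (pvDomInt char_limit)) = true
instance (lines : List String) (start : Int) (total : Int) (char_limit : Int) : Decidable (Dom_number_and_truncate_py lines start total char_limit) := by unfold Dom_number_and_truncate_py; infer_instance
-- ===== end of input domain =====

-- B replaces A's fused count-and-break loop by number-all, prefix-sum, locate cut, slice (objective: alternative decomposition, same cost).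

-- shared formatting helpers (the f-strings are identical in A and in B)
def pvNumbered (i : Int) (line : String) : List Char :=
  let t := PySem.Int.toChars i
  (List.replicate (6 - t.length) ' ' ++ t) ++ '|' :: PySem.Chars.rstrip line.toList

def pvTruncMsg (char_limit : Int) : List Char :=
  "... (truncated at ".toList ++ PySem.Int.toChars char_limit ++ " chars)".toList

def pvHeader (lines : List String) (start : Int) (total : Int) : List Char :=
  let e : Int := start + lines.length
  if start > 0 ∨ e < total then
    "(showing lines ".toList ++ PySem.Int.toChars (start + 1) ++ "–".toList ++
      PySem.Int.toChars (min e total) ++ " of ".toList ++ PySem.Int.toChars total ++ ")".toList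
  else
    "(".toList ++ PySem.Int.toChars total ++ " lines total)".toList

-- ===== PORT A =====
-- A's for-loop with running char_count and break
def pvALoop (ls : List String) (i : Int) (char_count : Int) (char_limit : Int) : List (List Char) :=
  match ls with
  | [] => []
  | l :: rest =>
    let numbered := pvNumbered i l
    let char_count := char_count + numbered.length + 1
    if char_count > char_limit then [pvTruncMsg char_limit]
    else numbered :: pvALoop rest (i + 1) char_count char_limit

def number_and_truncate_py (lines : List String) (start : Int) (total : Int) (char_limit : Int) : String :=
  let result_lines := pvALoop lines (start + 1) 0 char_limit
  String.ofList (pvHeader lines start total ++ '\n' :: List.intercalate ['\n'] result_lines)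

-- ===== PORT B =====
-- the comprehension over enumerate(lines, start+1)
def pvBNumber (ls : List String) (i : Int) : List (List Char) :=
  match ls with
  | [] => []
  | l :: rest => pvNumbered i l :: pvBNumber rest (i + 1)

def number_and_truncate_py_alt (lines : List String) (start : Int) (total : Int) (char_limit : Int) : String :=
  let numbered := pvBNumber lines (start + 1)
  let sums := ((numbered.map (fun s => (s.length : Int) + 1)).scanl (· + ·) 0).tail
  let body :=
    match sums.findIdx? (fun c => c > char_limit) with
    | some k => numbered.take k ++ [pvTruncMsg char_limit]
    | none => numbered
  String.ofList (pvHeader lines start total ++ '\n' :: List.intercalate ['\n'] body)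

-- ===== PRECONDITION & SPEC =====
def Spec_number_and_truncate_py (lines : List String) (start : Int) (total : Int) (char_limit : Int) (out : String) : Prop := out = number_and_truncate_py_alt lines start total char_limit
instance (lines : List String) (start : Int) (total : Int) (char_limit : Int) (out : String) : Decidable (Spec_number_and_truncate_py lines start total char_limit out) := by unfold Spec_number_and_truncate_py; infer_instance

-- ===== CLAIM (what is proved, stated in full; the proofs are below) =====
def Claim_equal_number_and_truncate_py : Prop := ∀ (lines : List String) (start : Int) (total : Int) (char_limit : Int), Dom_number_and_truncate_py lines start total char_limit → Spec_number_and_truncate_py lines start total char_limit (number_and_truncate_py lines start total char_limit)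

-- ===== LEMMAS AND PROOFS =====

theorem pvScanl_head {α β : Type} (f : β → α → β) (b : β) (l : List α) :
    List.scanl f b l = b :: (List.scanl f b l).tail := by
  cases l <;> simp

theorem pvLoop_eq (char_limit : Int) :
    ∀ (ls : List String) (i cc : Int),
      pvALoop ls i cc char_limit =
        (match ((((pvBNumber ls i).map (fun s => (s.length : Int) + 1)).scanl (· + ·) cc).tail).findIdx?
            (fun c => c > char_limit) with
         | some k => (pvBNumber ls i).take k ++ [pvTruncMsg char_limit]
         | none => pvBNumber ls i) := by
  intro ls
  induction ls with
  | nil => intro i cc; simp [pvALoop, pvBNumber]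
  | cons l rest ih =>
    intro i cc
    simp only [pvALoop, pvBNumber, List.map_cons, List.scanl_cons, List.tail_cons]
    rw [pvScanl_head, List.findIdx?_cons]
    by_cases h : cc + ((pvNumbered i l).length : Int) + 1 > char_limit
    · have hb : decide (cc + (((pvNumbered i l).length : Int) + 1) > char_limit) = true := by
        rw [decide_eq_true_iff]; omega
      simp [h, hb]
    · have hb : decide (cc + (((pvNumbered i l).length : Int) + 1) > char_limit) = false := by
        rw [decide_eq_false_iff_not]; omega
      simp only [if_neg h, hb, Bool.false_eq_true, if_false]
      rw [ih (i + 1) (cc + (pvNumbered i l).length + 1)]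
      rw [show cc + (((pvNumbered i l).length : Int) + 1) = cc + (pvNumbered i l).length + 1 by ring]
      cases hfi : ((((pvBNumber rest (i+1)).map (fun s => (s.length : Int) + 1)).scanl (· + ·)
          (cc + (pvNumbered i l).length + 1)).tail).findIdx? (fun c => c > char_limit) with
      | none => simp
      | some k => simp [List.take_succ_cons]

-- ===== VERDICT (by name: the statement is the Claim_ definition above) =====
theorem number_and_truncate_py_spec : Claim_equal_number_and_truncate_py := by
  intro lines start total char_limit _hdom
  unfold Spec_number_and_truncate_py number_and_truncate_py number_and_truncate_py_alt
  rw [pvLoop_eq char_limit lines (start + 1) 0]
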